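-- pv_equiv track=rewrite | github.com/RowanDark/galdr_dev_2 | interceptor/backend/modules/recon/engine.py | _analyze_technologies
-- ===== SOURCE A (Python) =====
-- from typing import Dict, List, Set, Optional, Union
--
-- def _analyze_technologies(technologies: List[str]) -> Dict[str, List[str]]:
--     """Categorize discovered technologies"""
--     categories = {
--         'web_servers': [],
--         'cms': [],
--         'databases': [],
--         'frameworks': [],
--         'cdn': [],
--         'security': [],
--         'analytics': [],
--         'other': []
--     }
--
--     # Technology categorization logic
--     for tech in technologies:
--         tech_lower = tech.lower()
--         if any(x in tech_lower for x in ['apache', 'nginx', 'iis', 'lighttpd']):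
--             categories['web_servers'].append(tech)
--         elif any(x in tech_lower for x in ['wordpress', 'drupal', 'joomla', 'magento']):
--             categories['cms'].append(tech)
--         elif any(x in tech_lower for x in ['mysql', 'postgresql', 'mongodb', 'redis']):
--             categories['databases'].append(tech)
--         elif any(x in tech_lower for x in ['react', 'angular', 'vue', 'django', 'rails']):
--             categories['frameworks'].append(tech)
--         elif any(x in tech_lower for x in ['cloudflare', 'akamai', 'fastly', 'amazon']):
--             categories['cdn'].append(tech)
--         else:
--             categories['other'].append(tech)
--
--     return {k: v for k, v in categories.items() if v}
-- ===== SOURCE B (Python) =====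
-- def _analyze_technologies(technologies):
--     """Categorize discovered technologies"""
--     table = [
--         ('web_servers', ['apache', 'nginx', 'iis', 'lighttpd']),
--         ('cms', ['wordpress', 'drupal', 'joomla', 'magento']),
--         ('databases', ['mysql', 'postgresql', 'mongodb', 'redis']),
--         ('frameworks', ['react', 'angular', 'vue', 'django', 'rails']),
--         ('cdn', ['cloudflare', 'akamai', 'fastly', 'amazon']),
--     ]
--
--     def classify(tech):
--         tech_lower = tech.lower()
--         return next((cat for cat, pats in table
--                      if any(p in tech_lower for p in pats)), 'other')
--
--     order = ['web_servers', 'cms', 'databases', 'frameworks', 'cdn',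
--              'security', 'analytics', 'other']
--     labels = [classify(t) for t in technologies]
--     buckets = [(cat, [t for t, lab in zip(technologies, labels) if lab == cat])
--                for cat in order]
--     return {cat: bucket for cat, bucket in buckets if bucket}
-- ===== Notes on version B (the rewrite author's own statement) =====
-- stated objective: alternative
-- what changed: Replaces the single mutating pass with an if/elif chain appending into a pre-built dict by a data-driven (category, patterns) table: a classify() lookup over the table plus one stable filter pass per category, assembled by a dict comprehension.
import Mathlib
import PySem

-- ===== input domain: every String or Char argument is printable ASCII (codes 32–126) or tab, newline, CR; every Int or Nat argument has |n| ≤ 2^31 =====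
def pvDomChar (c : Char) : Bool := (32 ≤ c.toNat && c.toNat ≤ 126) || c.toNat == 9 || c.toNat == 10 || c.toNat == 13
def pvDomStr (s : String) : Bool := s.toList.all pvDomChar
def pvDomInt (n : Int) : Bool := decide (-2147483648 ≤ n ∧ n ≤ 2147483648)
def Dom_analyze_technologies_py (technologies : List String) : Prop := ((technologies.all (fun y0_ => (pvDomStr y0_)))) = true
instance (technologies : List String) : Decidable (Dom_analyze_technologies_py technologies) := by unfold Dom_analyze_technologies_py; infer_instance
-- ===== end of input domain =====

-- B is an alternative decomposition of the same categorizer: a data-driven pattern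
-- table with a classify() lookup and one filter pass per category, instead of A's
-- single mutating pass with an if/elif chain (same cost, no speed claim).

-- ===== PORT A =====
-- the fixed-key 'categories' dict of A, one field per key
structure CatsA where
  web : List String
  cms : List String
  db : List String
  fw : List String
  cdn : List String
  sec : List String
  ana : List String
  other : List String
deriving Repr, DecidableEq

-- A's loop body (the if/elif chain), named so the proof can speak about the fold
def pvStepA (c : CatsA) (tech : String) : CatsA :=
  let tech_lower := PySem.Str.lower tech
  if ["apache", "nginx", "iis", "lighttpd"].any (fun x => PySem.Str.isIn x tech_lower) then
    { c with web := c.web ++ [tech] }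
  else if ["wordpress", "drupal", "joomla", "magento"].any (fun x => PySem.Str.isIn x tech_lower) then
    { c with cms := c.cms ++ [tech] }
  else if ["mysql", "postgresql", "mongodb", "redis"].any (fun x => PySem.Str.isIn x tech_lower) then
    { c with db := c.db ++ [tech] }
  else if ["react", "angular", "vue", "django", "rails"].any (fun x => PySem.Str.isIn x tech_lower) then
    { c with fw := c.fw ++ [tech] }
  else if ["cloudflare", "akamai", "fastly", "amazon"].any (fun x => PySem.Str.isIn x tech_lower) then
    { c with cdn := c.cdn ++ [tech] }
  else
    { c with other := c.other ++ [tech] }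

def analyze_technologies_py (technologies : List String) : List (String × List String) :=
  let categories : CatsA := ⟨[], [], [], [], [], [], [], []⟩
  let categories := technologies.foldl pvStepA categories
  ([("web_servers", categories.web), ("cms", categories.cms), ("databases", categories.db),
    ("frameworks", categories.fw), ("cdn", categories.cdn), ("security", categories.sec),
    ("analytics", categories.ana), ("other", categories.other)]).filter (fun kv => !kv.2.isEmpty)

-- ===== PORT B =====
def pvTableB : List (String × List String) :=
  [("web_servers", ["apache", "nginx", "iis", "lighttpd"]),
   ("cms", ["wordpress", "drupal", "joomla", "magento"]),
   ("databases", ["mysql", "postgresql", "mongodb", "redis"]),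
   ("frameworks", ["react", "angular", "vue", "django", "rails"]),
   ("cdn", ["cloudflare", "akamai", "fastly", "amazon"])]

def pvClassifyB (tech : String) : String :=
  let tech_lower := PySem.Str.lower tech
  match pvTableB.find? (fun cp => cp.2.any (fun p => PySem.Str.isIn p tech_lower)) with
  | some cp => cp.1
  | none => "other"

def pvOrderB : List String :=
  ["web_servers", "cms", "databases", "frameworks", "cdn", "security", "analytics", "other"]

def analyze_technologies_py_alt (technologies : List String) : List (String × List String) :=
  let labels := technologies.map pvClassifyB
  let buckets := pvOrderB.map (fun cat =>
    (cat, ((technologies.zip labels).filter (fun tl => tl.2 == cat)).map Prod.fst))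
  buckets.filter (fun kv => !kv.2.isEmpty)

-- ===== PRECONDITION & SPEC =====
def Spec_analyze_technologies_py (technologies : List String) (out : List (String × List String)) : Prop := out = analyze_technologies_py_alt technologies
instance (technologies : List String) (out : List (String × List String)) : Decidable (Spec_analyze_technologies_py technologies out) := by unfold Spec_analyze_technologies_py; infer_instance

-- ===== CLAIM (what is proved, stated in full; the proofs are below) =====
def Claim_equal_analyze_technologies_py : Prop := ∀ (technologies : List String), Dom_analyze_technologies_py technologies → Spec_analyze_technologies_py technologies (analyze_technologies_py technologies)

-- ===== LEMMAS AND PROOFS =====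

-- shorthand for B's per-category bucket
def pvF (l : List String) (cat : String) : List String :=
  l.filter (fun t => pvClassifyB t == cat)

theorem pvClassify_never_sec (t : String) :
    pvClassifyB t ≠ "security" ∧ pvClassifyB t ≠ "analytics" := by
  simp only [pvClassifyB, pvTableB]
  cases h : List.find? (fun cp => cp.2.any (fun p => PySem.Str.isIn p (PySem.Str.lower t)))
      [("web_servers", ["apache", "nginx", "iis", "lighttpd"]),
       ("cms", ["wordpress", "drupal", "joomla", "magento"]),
       ("databases", ["mysql", "postgresql", "mongodb", "redis"]),
       ("frameworks", ["react", "angular", "vue", "django", "rails"]),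
       ("cdn", ["cloudflare", "akamai", "fastly", "amazon"])] with
  | none => exact ⟨by decide, by decide⟩
  | some cp =>
    have hm := List.mem_of_find?_eq_some h
    simp only [List.mem_cons, List.not_mem_nil, or_false] at hm
    rcases hm with h' | h' | h' | h' | h' <;> subst h' <;> exact ⟨by decide, by decide⟩

theorem pvF_sec (l : List String) : List.filter (fun t => pvClassifyB t == "security") l = [] := by
  simp only [List.filter_eq_nil_iff]
  intro t _
  simpa using (pvClassify_never_sec t).1

theorem pvF_ana (l : List String) : List.filter (fun t => pvClassifyB t == "analytics") l = [] := by
  simp only [List.filter_eq_nil_iff]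
  intro t _
  simpa using (pvClassify_never_sec t).2

-- the invariant: A's fold over l starting from c appends exactly B's buckets
theorem pvFold_eq (l : List String) (c : CatsA) :
    l.foldl pvStepA c =
    ⟨c.web ++ pvF l "web_servers", c.cms ++ pvF l "cms", c.db ++ pvF l "databases",
     c.fw ++ pvF l "frameworks", c.cdn ++ pvF l "cdn", c.sec, c.ana, c.other ++ pvF l "other"⟩ := by
  induction l generalizing c with
  | nil => simp [pvF]
  | cons t l ih =>
    simp only [List.foldl_cons, pvStepA]
    by_cases h1 : ["apache", "nginx", "iis", "lighttpd"].any (fun x => PySem.Str.isIn x (PySem.Str.lower t)) = true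
    · rw [if_pos h1, ih]
      have hc : pvClassifyB t = "web_servers" := by
        simp only [pvClassifyB, pvTableB, List.find?_cons, h1]
      simp [pvF, hc]
    · rw [if_neg h1]
      by_cases h2 : ["wordpress", "drupal", "joomla", "magento"].any (fun x => PySem.Str.isIn x (PySem.Str.lower t)) = true
      · rw [if_pos h2, ih]
        have hc : pvClassifyB t = "cms" := by
          rw [Bool.not_eq_true] at h1
          simp only [pvClassifyB, pvTableB, List.find?_cons, h1, h2]
        simp [pvF, hc]
      · rw [if_neg h2]
        by_cases h3 : ["mysql", "postgresql", "mongodb", "redis"].any (fun x => PySem.Str.isIn x (PySem.Str.lower t)) = true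
        · rw [if_pos h3, ih]
          have hc : pvClassifyB t = "databases" := by
            rw [Bool.not_eq_true] at h1 h2
            simp only [pvClassifyB, pvTableB, List.find?_cons, h1, h2, h3]
          simp [pvF, hc]
        · rw [if_neg h3]
          by_cases h4 : ["react", "angular", "vue", "django", "rails"].any (fun x => PySem.Str.isIn x (PySem.Str.lower t)) = true
          · rw [if_pos h4, ih]
            have hc : pvClassifyB t = "frameworks" := by
              rw [Bool.not_eq_true] at h1 h2 h3
              simp only [pvClassifyB, pvTableB, List.find?_cons, h1, h2, h3, h4]
            simp [pvF, hc]
          · rw [if_neg h4]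
            by_cases h5 : ["cloudflare", "akamai", "fastly", "amazon"].any (fun x => PySem.Str.isIn x (PySem.Str.lower t)) = true
            · rw [if_pos h5, ih]
              have hc : pvClassifyB t = "cdn" := by
                rw [Bool.not_eq_true] at h1 h2 h3 h4
                simp only [pvClassifyB, pvTableB, List.find?_cons, h1, h2, h3, h4, h5]
              simp [pvF, hc]
            · rw [if_neg h5, ih]
              have hc : pvClassifyB t = "other" := by
                rw [Bool.not_eq_true] at h1 h2 h3 h4 h5
                simp only [pvClassifyB, pvTableB, List.find?_cons, h1, h2, h3, h4, h5,
                           List.find?_nil]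
              simp [pvF, hc]

-- B's zip-with-labels bucket is the direct filter by classify
theorem pvZip_filter (l : List String) (cat : String) :
    ((l.zip (l.map pvClassifyB)).filter (fun tl => tl.2 == cat)).map Prod.fst =
    l.filter (fun t => pvClassifyB t == cat) := by
  induction l with
  | nil => rfl
  | cons t l ih =>
    simp only [List.map_cons, List.zip_cons_cons, List.filter_cons]
    by_cases h : (pvClassifyB t == cat) = true
    · simp [h, ih]
    · simp only [Bool.not_eq_true] at h
      simp [h, ih]

-- ===== VERDICT (by name: the statement is the Claim_ definition above) =====
theorem analyze_technologies_py_spec : Claim_equal_analyze_technologies_py := by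
  intro l _
  show analyze_technologies_py l = analyze_technologies_py_alt l
  unfold analyze_technologies_py analyze_technologies_py_alt
  simp only [pvFold_eq, pvOrderB, List.map_cons, List.map_nil, pvZip_filter]
  simp only [pvF, pvF_sec l, pvF_ana l, List.nil_append]
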